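-- pv_equiv track=rewrite | github.com/astonwebdesign/nolossia | src/merge_engine.py | _undo_counts
-- ===== SOURCE A (Python) =====
-- def _undo_counts(entries: list[dict]) -> dict:
--     counts = {
--         "total": len(entries),
--         "restore": 0,
--         "conflict": 0,
--         "skipped": 0,
--         "already_restored": 0,
--         "missing": 0,
--     }
--     for entry in entries:
--         status = entry.get("status")
--         if status in ("restore", "would_restore", "restored"):
--             counts["restore"] += 1
--         elif status in ("conflict", "would_conflict", "conflict_routed", "conflict_missing_source"):
--             counts["conflict"] += 1
--         elif status in ("skipped_restored", "skipped_missing", "skipped_invalid"):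
--             counts["skipped"] += 1
--             if status == "skipped_restored":
--                 counts["already_restored"] += 1
--             if status in ("skipped_missing", "skipped_invalid"):
--                 counts["missing"] += 1
--     return counts
-- ===== SOURCE B (Python) =====
-- def _undo_counts(entries: list[dict]) -> dict:
--     statuses = [entry.get("status") for entry in entries]
--     n = statuses.count
--     return {
--         "total": len(entries),
--         "restore": n("restore") + n("would_restore") + n("restored"),
--         "conflict": n("conflict") + n("would_conflict") + n("conflict_routed") + n("conflict_missing_source"),
--         "skipped": n("skipped_restored") + n("skipped_missing") + n("skipped_invalid"),
--         "already_restored": n("skipped_restored"),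
--         "missing": n("skipped_missing") + n("skipped_invalid"),
--     }
-- ===== Notes on version B (the rewrite author's own statement) =====
-- stated objective: simpler
-- what changed: Replaces the per-entry if/elif branching that mutates a counts dict with a count-then-derive structure: collect the status of each entry once, then build the result dict directly from fixed-key counts of that list.
import Mathlib
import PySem

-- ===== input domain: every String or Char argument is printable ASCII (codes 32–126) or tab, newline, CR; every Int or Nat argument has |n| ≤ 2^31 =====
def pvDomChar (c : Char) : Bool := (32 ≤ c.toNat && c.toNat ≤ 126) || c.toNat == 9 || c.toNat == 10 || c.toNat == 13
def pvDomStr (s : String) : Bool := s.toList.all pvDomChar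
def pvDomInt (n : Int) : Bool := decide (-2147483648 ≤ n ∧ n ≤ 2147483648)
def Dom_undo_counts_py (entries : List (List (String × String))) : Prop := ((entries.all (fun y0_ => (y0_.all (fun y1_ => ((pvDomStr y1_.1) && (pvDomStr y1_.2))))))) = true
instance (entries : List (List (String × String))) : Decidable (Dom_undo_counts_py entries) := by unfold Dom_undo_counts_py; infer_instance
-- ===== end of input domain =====

-- B replaces A's per-entry if/elif mutation of a counts dict by a count-then-derive structure: collect each entry's status once, then build the result dict from fixed-key counts of that list (objective: simpler).

-- ===== PORT A =====
-- loop body of A's for-loop (literal: branch order and dict updates as in the Python)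
def pvStepA (counts : PySem.Dict String Int) (entry : List (String × String)) : PySem.Dict String Int :=
  let status := (PySem.Dict.mk entry).get? "status"
  if status = some "restore" ∨ status = some "would_restore" ∨ status = some "restored" then
    counts.modify "restore" 0 (· + 1)
  else if status = some "conflict" ∨ status = some "would_conflict" ∨ status = some "conflict_routed" ∨ status = some "conflict_missing_source" then
    counts.modify "conflict" 0 (· + 1)
  else if status = some "skipped_restored" ∨ status = some "skipped_missing" ∨ status = some "skipped_invalid" then
    let counts := counts.modify "skipped" 0 (· + 1)
    let counts := if status = some "skipped_restored" then counts.modify "already_restored" 0 (· + 1) else counts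
    if status = some "skipped_missing" ∨ status = some "skipped_invalid" then counts.modify "missing" 0 (· + 1) else counts
  else counts

def undo_counts_py (entries : List (List (String × String))) : List (String × Int) :=
  let counts : PySem.Dict String Int := PySem.Dict.mk
    [("total", (entries.length : Int)), ("restore", 0), ("conflict", 0),
     ("skipped", 0), ("already_restored", 0), ("missing", 0)]
  (entries.foldl pvStepA counts).items

-- ===== PORT B =====
def undo_counts_py_alt (entries : List (List (String × String))) : List (String × Int) :=
  let statuses := entries.map (fun entry => (PySem.Dict.mk entry).get? "status")
  let n := fun (s : String) => (PySem.List.count statuses (some s) : Int)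
  [("total", (entries.length : Int)),
   ("restore", n "restore" + n "would_restore" + n "restored"),
   ("conflict", n "conflict" + n "would_conflict" + n "conflict_routed" + n "conflict_missing_source"),
   ("skipped", n "skipped_restored" + n "skipped_missing" + n "skipped_invalid"),
   ("already_restored", n "skipped_restored"),
   ("missing", n "skipped_missing" + n "skipped_invalid")]

-- ===== PRECONDITION & SPEC =====
def Spec_undo_counts_py (entries : List (List (String × String))) (out : List (String × Int)) : Prop := out = undo_counts_py_alt entries
instance (entries : List (List (String × String))) (out : List (String × Int)) : Decidable (Spec_undo_counts_py entries out) := by unfold Spec_undo_counts_py; infer_instance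

-- ===== CLAIM (what is proved, stated in full; the proofs are below) =====
def Claim_equal_undo_counts_py : Prop := ∀ (entries : List (List (String × String))), Dom_undo_counts_py entries → Spec_undo_counts_py entries (undo_counts_py entries)

-- ===== LEMMAS AND PROOFS =====

-- count of a given status among the entries, as B computes it
def pvN (entries : List (List (String × String))) (s : String) : Int :=
  (PySem.List.count (entries.map (fun entry => (PySem.Dict.mk entry).get? "status")) (some s) : Int)

lemma pvN_cons (e : List (String × String)) (es : List (List (String × String))) (s : String) :
    pvN (e :: es) s = (if (PySem.Dict.mk e).get? "status" = some s then 1 else 0) + pvN es s := by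
  simp only [pvN, PySem.List.count_eq, List.map_cons, List.count_cons, beq_iff_eq]
  split_ifs <;> push_cast <;> omega

lemma loopA_eq (entries : List (List (String × String))) (t r c s a m : Int) :
    (entries.foldl pvStepA (PySem.Dict.mk
      [("total", t), ("restore", r), ("conflict", c), ("skipped", s), ("already_restored", a), ("missing", m)])).items
    = [("total", t),
       ("restore", r + (pvN entries "restore" + pvN entries "would_restore" + pvN entries "restored")),
       ("conflict", c + (pvN entries "conflict" + pvN entries "would_conflict" + pvN entries "conflict_routed" + pvN entries "conflict_missing_source")),
       ("skipped", s + (pvN entries "skipped_restored" + pvN entries "skipped_missing" + pvN entries "skipped_invalid")),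
       ("already_restored", a + pvN entries "skipped_restored"),
       ("missing", m + (pvN entries "skipped_missing" + pvN entries "skipped_invalid"))] := by
  induction entries generalizing r c s a m with
  | nil => simp [pvN, PySem.List.count_eq]
  | cons e es ih =>
    simp only [List.foldl_cons, pvStepA]
    by_cases h1 : (PySem.Dict.mk e).get? "status" = some "restore" ∨ (PySem.Dict.mk e).get? "status" = some "would_restore" ∨ (PySem.Dict.mk e).get? "status" = some "restored"
    · rw [if_pos h1,
        show (PySem.Dict.mk [("total", t), ("restore", r), ("conflict", c), ("skipped", s), ("already_restored", a), ("missing", m)]).modify "restore" 0 (· + 1)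
          = PySem.Dict.mk [("total", t), ("restore", r + 1), ("conflict", c), ("skipped", s), ("already_restored", a), ("missing", m)] from by
            simp [PySem.Dict.modify, PySem.Dict.getD, PySem.Dict.get?, PySem.Dict.insert, PySem.Dict.contains],
        ih]
      rcases h1 with h | h | h <;> simp [pvN_cons, h] <;> ring
    · rw [if_neg h1]
      by_cases h2 : (PySem.Dict.mk e).get? "status" = some "conflict" ∨ (PySem.Dict.mk e).get? "status" = some "would_conflict" ∨ (PySem.Dict.mk e).get? "status" = some "conflict_routed" ∨ (PySem.Dict.mk e).get? "status" = some "conflict_missing_source"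
      · rw [if_pos h2,
          show (PySem.Dict.mk [("total", t), ("restore", r), ("conflict", c), ("skipped", s), ("already_restored", a), ("missing", m)]).modify "conflict" 0 (· + 1)
            = PySem.Dict.mk [("total", t), ("restore", r), ("conflict", c + 1), ("skipped", s), ("already_restored", a), ("missing", m)] from by
              simp [PySem.Dict.modify, PySem.Dict.getD, PySem.Dict.get?, PySem.Dict.insert, PySem.Dict.contains],
          ih]
        rcases h2 with h | h | h | h <;> simp [pvN_cons, h] <;> ring
      · rw [if_neg h2]
        by_cases h3 : (PySem.Dict.mk e).get? "status" = some "skipped_restored" ∨ (PySem.Dict.mk e).get? "status" = some "skipped_missing" ∨ (PySem.Dict.mk e).get? "status" = some "skipped_invalid"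
        · rw [if_pos h3]
          rcases h3 with h | h | h
          · rw [if_neg (show ¬((PySem.Dict.mk e).get? "status" = some "skipped_missing" ∨ (PySem.Dict.mk e).get? "status" = some "skipped_invalid") from by simp [h]),
              if_pos h,
              show ((PySem.Dict.mk [("total", t), ("restore", r), ("conflict", c), ("skipped", s), ("already_restored", a), ("missing", m)]).modify "skipped" 0 (· + 1)).modify "already_restored" 0 (· + 1)
                = PySem.Dict.mk [("total", t), ("restore", r), ("conflict", c), ("skipped", s + 1), ("already_restored", a + 1), ("missing", m)] from by simp [PySem.Dict.modify, PySem.Dict.getD, PySem.Dict.get?, PySem.Dict.insert, PySem.Dict.contains],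
              ih]
            simp [pvN_cons, h]
            constructor <;> ring
          · rw [if_pos (Or.inl h),
              if_neg (show ¬(PySem.Dict.mk e).get? "status" = some "skipped_restored" from by simp [h]),
              show ((PySem.Dict.mk [("total", t), ("restore", r), ("conflict", c), ("skipped", s), ("already_restored", a), ("missing", m)]).modify "skipped" 0 (· + 1)).modify "missing" 0 (· + 1)
                = PySem.Dict.mk [("total", t), ("restore", r), ("conflict", c), ("skipped", s + 1), ("already_restored", a), ("missing", m + 1)] from by simp [PySem.Dict.modify, PySem.Dict.getD, PySem.Dict.get?, PySem.Dict.insert, PySem.Dict.contains],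
              ih]
            simp [pvN_cons, h]
            constructor <;> ring
          · rw [if_pos (Or.inr h),
              if_neg (show ¬(PySem.Dict.mk e).get? "status" = some "skipped_restored" from by simp [h]),
              show ((PySem.Dict.mk [("total", t), ("restore", r), ("conflict", c), ("skipped", s), ("already_restored", a), ("missing", m)]).modify "skipped" 0 (· + 1)).modify "missing" 0 (· + 1)
                = PySem.Dict.mk [("total", t), ("restore", r), ("conflict", c), ("skipped", s + 1), ("already_restored", a), ("missing", m + 1)] from by simp [PySem.Dict.modify, PySem.Dict.getD, PySem.Dict.get?, PySem.Dict.insert, PySem.Dict.contains],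
              ih]
            simp [pvN_cons, h]
            constructor <;> ring
        · rw [if_neg h3, ih]
          push Not at h1 h2 h3
          simp [pvN_cons, h1.1, h1.2.1, h1.2.2, h2.1, h2.2.1, h2.2.2.1, h2.2.2.2, h3.1, h3.2.1, h3.2.2]

-- ===== VERDICT (by name: the statement is the Claim_ definition above) =====
theorem undo_counts_py_spec : Claim_equal_undo_counts_py := by
  intro entries _
  unfold Spec_undo_counts_py undo_counts_py undo_counts_py_alt
  rw [loopA_eq]
  simp [pvN]
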